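-- pv_equiv track=rewrite | github.com/Eduard0Rocha/PL2023 | TPC1/main.py | distr_nivel_c
-- ===== SOURCE A (Python) =====
-- def tem_doenca(entry):
--
--     return entry[5]
--
-- def get_colesterol(entry):
--
--     return entry[3]
--
-- def colestrol_no_nivel(entry,min_c,max_c):
--
--     c = get_colesterol(entry)
--
--     return c >= min_c and c <= max_c
--
-- def distr_nivel_c(min_c,max_c,data):
--
--     nr_cm_doenca = 0
--     nr_sem_doenca = 0
--
--     for entry in data:
--
--         if (colestrol_no_nivel(entry,min_c,max_c)):
--
--             if (tem_doenca(entry)):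
--
--                 nr_cm_doenca += 1
--
--             else:
--
--                 nr_sem_doenca += 1
--
--     return [nr_cm_doenca,nr_sem_doenca]
-- ===== SOURCE B (Python) =====
-- def distr_nivel_c(min_c, max_c, data):
--     def go(lo, hi):
--         n = hi - lo
--         if n == 0:
--             return (0, 0)
--         if n == 1:
--             e = data[lo]
--             if min_c <= e[3] <= max_c:
--                 return (1, 0) if e[5] else (0, 1)
--             return (0, 0)
--         mid = (lo + hi) // 2
--         d1, h1 = go(lo, mid)
--         d2, h2 = go(mid, hi)
--         return (d1 + d2, h1 + h2)
--     d, h = go(0, len(data))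
--     return [d, h]
-- ===== Notes on version B (the rewrite author's own statement) =====
-- stated objective: alternative
-- what changed: Replaces A's single left-to-right loop with dual counters by a divide-and-conquer recursion over index ranges that classifies single entries at the leaves and adds the pair of counts of the two halves.
import Mathlib
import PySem

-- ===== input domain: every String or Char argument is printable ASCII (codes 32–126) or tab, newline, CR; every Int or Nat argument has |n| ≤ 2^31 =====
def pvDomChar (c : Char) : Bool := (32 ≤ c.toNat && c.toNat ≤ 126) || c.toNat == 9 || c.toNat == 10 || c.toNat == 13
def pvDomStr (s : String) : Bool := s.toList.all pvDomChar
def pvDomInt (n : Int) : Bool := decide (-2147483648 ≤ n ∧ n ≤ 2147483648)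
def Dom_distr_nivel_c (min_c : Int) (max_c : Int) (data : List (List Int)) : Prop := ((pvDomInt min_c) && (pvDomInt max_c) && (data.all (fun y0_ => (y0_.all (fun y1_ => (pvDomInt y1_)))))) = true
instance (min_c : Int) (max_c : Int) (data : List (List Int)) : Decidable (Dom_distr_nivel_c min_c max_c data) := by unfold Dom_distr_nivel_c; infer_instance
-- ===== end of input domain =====

-- B replaces A's single left-to-right loop with dual counters by a divide-and-conquer
-- recursion over index ranges: leaves classify one entry, internal calls add the two halves.

-- ===== PORT A =====
-- helper tem_doenca: entry[5] (truthy test on an int: ≠ 0); index guarded by Pre_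
def tem_doenca (entry : List Int) : Int := (PySem.List.pyGet? entry 5).getD 0

-- helper get_colesterol: entry[3]; index guarded by Pre_
def get_colesterol (entry : List Int) : Int := (PySem.List.pyGet? entry 3).getD 0

-- helper colestrol_no_nivel
def colestrol_no_nivel (entry : List Int) (min_c max_c : Int) : Bool :=
  let c := get_colesterol entry
  decide (c ≥ min_c) && decide (c ≤ max_c)

def distr_nivel_c (min_c : Int) (max_c : Int) (data : List (List Int)) : List Int :=
  let st := data.foldl (fun (p : Int × Int) entry =>
    if colestrol_no_nivel entry min_c max_c then
      if tem_doenca entry ≠ 0 then (p.1 + 1, p.2) else (p.1, p.2 + 1)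
    else p) (0, 0)
  [st.1, st.2]

-- ===== PORT B =====
-- inner helper go(lo, hi): divide-and-conquer over the index range [lo, hi).
-- The fuel parameter only guards totality (each call halves the range, so
-- fuel = hi - lo suffices; distr_nivel_c_alt passes data.length).
def pv_goB (min_c : Int) (max_c : Int) (data : List (List Int)) : Nat → Nat → Nat → Int × Int
  | 0, _, _ => (0, 0)
  | fuel + 1, lo, hi =>
    if hi - lo = 0 then (0, 0)
    else if hi - lo = 1 then
      let e := (PySem.List.pyGet? data (lo : Int)).getD []
      if decide (min_c ≤ (PySem.List.pyGet? e 3).getD 0) && decide ((PySem.List.pyGet? e 3).getD 0 ≤ max_c) then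
        if (PySem.List.pyGet? e 5).getD 0 ≠ 0 then (1, 0) else (0, 1)
      else (0, 0)
    else
      let p := pv_goB min_c max_c data fuel lo ((lo + hi) / 2)
      let q := pv_goB min_c max_c data fuel ((lo + hi) / 2) hi
      (p.1 + q.1, p.2 + q.2)

def distr_nivel_c_alt (min_c : Int) (max_c : Int) (data : List (List Int)) : List Int :=
  let p := pv_goB min_c max_c data data.length 0 data.length
  [p.1, p.2]

-- ===== PRECONDITION & SPEC =====
-- Pre_ excludes exactly the inputs where Python A raises IndexError: a row shorter
-- than 4 (entry[3] is read for every row), or an in-range row shorter than 6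
-- (entry[5] is read for in-range rows).
def Pre_distr_nivel_c (min_c : Int) (max_c : Int) (data : List (List Int)) : Prop :=
  ∀ e ∈ data, 4 ≤ e.length ∧ ((min_c ≤ e.getD 3 0 ∧ e.getD 3 0 ≤ max_c) → 6 ≤ e.length)
instance (min_c : Int) (max_c : Int) (data : List (List Int)) : Decidable (Pre_distr_nivel_c min_c max_c data) := by unfold Pre_distr_nivel_c; infer_instance
def pvWitness_distr_nivel_c : Int × Int × List (List Int) := (0, 10, [[1, 2, 3, 4, 5, 6], [0, 0, 0, 7, 0, 0]])
def Spec_distr_nivel_c (min_c : Int) (max_c : Int) (data : List (List Int)) (out : List Int) : Prop := out = distr_nivel_c_alt min_c max_c data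
instance (min_c : Int) (max_c : Int) (data : List (List Int)) (out : List Int) : Decidable (Spec_distr_nivel_c min_c max_c data out) := by unfold Spec_distr_nivel_c; infer_instance

-- ===== CLAIM (what is proved, stated in full; the proofs are below) =====
def Claim_equal_distr_nivel_c : Prop := ∀ (min_c : Int) (max_c : Int) (data : List (List Int)), Dom_distr_nivel_c min_c max_c data → Pre_distr_nivel_c min_c max_c data → Spec_distr_nivel_c min_c max_c data (distr_nivel_c min_c max_c data)

-- ===== LEMMAS AND PROOFS =====

-- the predicates both ports test, as Bool functions
def pvQ (min_c max_c : Int) (e : List Int) : Bool :=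
  decide (min_c ≤ (PySem.List.pyGet? e 3).getD 0) && decide ((PySem.List.pyGet? e 3).getD 0 ≤ max_c)
def pvR (e : List Int) : Bool := decide ((PySem.List.pyGet? e 5).getD 0 ≠ 0)

-- the pair of counts (diseased-in-range, healthy-in-range) over a list
def pvCnt (min_c max_c : Int) (l : List (List Int)) : Int × Int :=
  ((((l.filter (pvQ min_c max_c)).filter pvR).length : Int),
   (((l.filter (pvQ min_c max_c)).filter (fun e => ! pvR e)).length : Int))

-- pvCnt is additive over append
theorem pvCnt_append (min_c max_c : Int) (l₁ l₂ : List (List Int)) :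
    pvCnt min_c max_c (l₁ ++ l₂)
    = ((pvCnt min_c max_c l₁).1 + (pvCnt min_c max_c l₂).1,
       (pvCnt min_c max_c l₁).2 + (pvCnt min_c max_c l₂).2) := by
  simp [pvCnt, List.filter_append]

-- A's fold from an arbitrary accumulator adds the (Q,R)- and (Q,¬R)-counts.
theorem pv_fold_generic {α : Type} (Q R : α → Prop) [DecidablePred Q] [DecidablePred R]
    (l : List α) : ∀ (a b : Int),
    l.foldl (fun (p : Int × Int) e =>
      if Q e then (if R e then (p.1 + 1, p.2) else (p.1, p.2 + 1)) else p) (a, b)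
    = (a + ((l.filter (fun e => decide (Q e))).filter (fun e => decide (R e))).length,
       b + ((l.filter (fun e => decide (Q e))).filter (fun e => ! decide (R e))).length) := by
  induction l with
  | nil => intro a b; simp
  | cons x t ih =>
    intro a b
    rw [List.foldl_cons, List.filter_cons]
    by_cases hq : Q x
    · rw [if_pos hq]
      by_cases hr : R x
      · rw [if_pos hr, ih]
        simp only [hq, hr, decide_true, if_true, List.filter_cons, Bool.not_true,
          Bool.false_eq_true, if_false, List.length_cons]
        simp only [Prod.mk.injEq]
        constructor <;> push_cast <;> ring
      · rw [if_neg hr, ih]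
        simp only [hq, hr, decide_true, decide_false, if_true, List.filter_cons,
          Bool.not_false, Bool.false_eq_true, if_false, if_true, List.length_cons]
        simp only [Prod.mk.injEq]
        constructor <;> push_cast <;> ring
    · rw [if_neg hq, ih]
      simp only [hq, decide_false, Bool.false_eq_true, if_false]

-- B's recursion on [lo,hi) computes pvCnt of the slice data[lo:hi] (given enough fuel)
theorem pv_goB_eq_cnt (min_c max_c : Int) (data : List (List Int)) :
    ∀ (fuel lo hi : Nat), hi - lo ≤ fuel → hi ≤ data.length →
      pv_goB min_c max_c data fuel lo hi = pvCnt min_c max_c ((data.drop lo).take (hi - lo)) := by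
  intro fuel
  induction fuel with
  | zero =>
    intro lo hi hk _
    have h0 : hi - lo = 0 := by omega
    rw [h0]
    simp [pv_goB, pvCnt]
  | succ fuel ih =>
    intro lo hi hk hlen
    by_cases h0 : hi - lo = 0
    · rw [pv_goB, if_pos h0, h0]
      simp [pvCnt]
    · by_cases h1 : hi - lo = 1
      · have hlo : lo < data.length := by omega
        rw [pv_goB, if_neg h0, if_pos h1, h1]
        have hdrop : data.drop lo = data[lo] :: data.drop (lo + 1) :=
          List.drop_eq_getElem_cons hlo
        have hget : (PySem.List.pyGet? data (lo : Int)).getD [] = data[lo] := by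
          rw [PySem.List.pyGet?_natCast]
          simp [List.getElem?_eq_getElem hlo]
        rw [hget, hdrop]
        simp only [List.take_succ_cons, List.take_zero, pvCnt, List.filter_cons]
        by_cases hq : pvQ min_c max_c data[lo] = true
        · have hq' := hq
          simp only [pvQ, Bool.and_eq_true, decide_eq_true_eq] at hq'
          rw [if_pos (by simp [hq'.1, hq'.2]), hq]
          by_cases hr : (PySem.List.pyGet? data[lo] 5).getD 0 ≠ 0
          · rw [if_pos hr]
            have : pvR data[lo] = true := by simp [pvR, hr]
            simp [this]
          · rw [if_neg hr]
            have : pvR data[lo] = false := by simp [pvR]; omega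
            simp [this]
        · have hq' : pvQ min_c max_c data[lo] = false := by
            simpa using hq
          rw [if_neg (by simpa [pvQ] using hq), hq']
          simp
      · -- hi - lo ≥ 2: split at mid
        rw [pv_goB, if_neg h0, if_neg h1]
        have hmid₁ : lo < (lo + hi) / 2 := by omega
        have hmid₂ : (lo + hi) / 2 < hi := by omega
        rw [ih lo ((lo + hi) / 2) (by omega) (by omega),
            ih ((lo + hi) / 2) hi (by omega) hlen]
        have hsplit : (data.drop lo).take (hi - lo)
            = (data.drop lo).take ((lo + hi) / 2 - lo)
              ++ (data.drop ((lo + hi) / 2)).take (hi - (lo + hi) / 2) := by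
          have h2 : hi - lo = ((lo + hi) / 2 - lo) + (hi - (lo + hi) / 2) := by omega
          rw [h2, List.take_add, List.drop_drop]
          have : lo + ((lo + hi) / 2 - lo) = (lo + hi) / 2 := by omega
          rw [this]
        rw [hsplit, pvCnt_append]

-- ===== VERDICT (by name: the statement is the Claim_ definition above) =====
theorem distr_nivel_c_spec : Claim_equal_distr_nivel_c := by
  intro min_c max_c data _ _
  unfold Spec_distr_nivel_c distr_nivel_c distr_nivel_c_alt
  rw [pv_fold_generic (fun e => colestrol_no_nivel e min_c max_c = true)
        (fun e => tem_doenca e ≠ 0) data 0 0]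
  rw [pv_goB_eq_cnt min_c max_c data data.length 0 data.length (by omega) le_rfl]
  have hQ : (fun (e : List Int) => decide (colestrol_no_nivel e min_c max_c = true))
      = pvQ min_c max_c := by
    funext e; simp [colestrol_no_nivel, get_colesterol, pvQ, ge_iff_le]
  have hR : (fun (e : List Int) => decide (tem_doenca e ≠ 0)) = pvR := by
    funext e; simp [tem_doenca, pvR]
  have hR' : (fun (e : List Int) => ! decide (tem_doenca e ≠ 0))
      = (fun e => ! pvR e) := by
    funext e; simp [tem_doenca, pvR]
  rw [hQ, hR, hR']
  simp [pvCnt]
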